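-- pv_equiv track=rewrite | github.com/innovationwizard/tragaldabas | stages/s9_dependency_graph/builder.py | _collect_component
-- ===== SOURCE A (Python) =====
-- from typing import Dict, Iterable, List, Optional, Set, Tuple
--
-- def _collect_component(
--
--     start: str,
--     adjacency: Dict[str, Set[str]],
--     reverse_adjacency: Dict[str, Set[str]],
-- ) -> Set[str]:
--     stack = [start]
--     component: Set[str] = set()
--     while stack:
--         node = stack.pop()
--         if node in component:
--             continue
--         component.add(node)
--         stack.extend(adjacency.get(node, set()))
--         stack.extend(reverse_adjacency.get(node, set()))
--     return component
-- ===== SOURCE B (Python) =====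
-- def _collect_component(start, adjacency, reverse_adjacency):
--     component = set()
--
--     def dfs(node):
--         if node in component:
--             return
--         component.add(node)
--         for pred in reverse_adjacency.get(node, set()):
--             dfs(pred)
--         for succ in adjacency.get(node, set()):
--             dfs(succ)
--
--     dfs(start)
--     return component
-- ===== Notes on version B (the rewrite author's own statement) =====
-- stated objective: alternative
-- what changed: A's explicit-stack while loop with pop/extend bookkeeping is replaced by a recursive DFS: a nested dfs(node) helper that skips already-collected nodes, adds the node and recurses over its predecessors and successors; same reachability set, recursive decomposition instead of an explicit stack (deep components may hit Python's recursion limit).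
import Mathlib
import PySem

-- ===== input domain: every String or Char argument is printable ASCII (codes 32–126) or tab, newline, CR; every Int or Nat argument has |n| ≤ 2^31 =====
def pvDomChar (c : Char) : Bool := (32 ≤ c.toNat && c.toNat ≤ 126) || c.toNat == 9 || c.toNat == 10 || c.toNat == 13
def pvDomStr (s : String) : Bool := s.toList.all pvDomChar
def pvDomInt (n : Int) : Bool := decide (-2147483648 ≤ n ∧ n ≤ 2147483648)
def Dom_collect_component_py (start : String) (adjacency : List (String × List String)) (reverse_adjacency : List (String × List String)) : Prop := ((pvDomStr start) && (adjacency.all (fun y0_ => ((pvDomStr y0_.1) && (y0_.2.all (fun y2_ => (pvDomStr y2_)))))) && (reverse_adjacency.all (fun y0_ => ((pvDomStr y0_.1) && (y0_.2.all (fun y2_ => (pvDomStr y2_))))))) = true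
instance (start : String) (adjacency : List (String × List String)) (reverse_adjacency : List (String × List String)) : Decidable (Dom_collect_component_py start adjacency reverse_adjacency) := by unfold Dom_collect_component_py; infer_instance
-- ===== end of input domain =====

-- B replaces A's explicit-stack loop by a recursive DFS (alternative decomposition, same cost);
-- the returned component is a Python set, so only its membership is caller-observable — the ports
-- agree as lists because both record nodes in the same depth-first discovery order.

-- dict.get(node, set()) on the assoc-list dict: first matching key, default empty (used by both ports)
def pvLookup (d : List (String × List String)) (k : String) : List String :=
  match d.find? (fun p => p.1 == k) with
  | some p => p.2
  | none => []

-- termination measure shared by both ports: keys of both dicts not yet in the component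
def pvMeasure (adjacency reverse_adjacency : List (String × List String)) (component : List String) : Nat :=
  (((adjacency.map Prod.fst ++ reverse_adjacency.map Prod.fst).toFinset) \ component.toFinset).card

theorem pvLookup_eq_nil (d : List (String × List String)) (node : String)
    (h : node ∉ d.map Prod.fst) : pvLookup d node = [] := by
  simp only [List.mem_map, not_exists] at h
  unfold pvLookup
  rw [List.find?_eq_none.mpr
    (fun p hp => by simp only [beq_iff_eq]; exact fun e => h p ⟨hp, e⟩)]

theorem pvMeasure_le (adjacency reverse_adjacency : List (String × List String))
    {c c' : List String} (h : ∀ x ∈ c, x ∈ c') :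
    pvMeasure adjacency reverse_adjacency c' ≤ pvMeasure adjacency reverse_adjacency c := by
  unfold pvMeasure
  apply Finset.card_le_card
  apply Finset.sdiff_subset_sdiff (Finset.Subset.refl _)
  intro x hx
  simp only [List.mem_toFinset] at *
  exact h x hx

theorem pvMeasure_append_lt (adjacency reverse_adjacency : List (String × List String))
    {c : List String} {node : String}
    (hk : node ∈ (adjacency.map Prod.fst ++ reverse_adjacency.map Prod.fst))
    (hc : node ∉ c) :
    pvMeasure adjacency reverse_adjacency (c ++ [node]) < pvMeasure adjacency reverse_adjacency c := by
  unfold pvMeasure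
  apply Finset.card_lt_card
  constructor
  · apply Finset.sdiff_subset_sdiff (Finset.Subset.refl _)
    intro x hx
    simp only [List.mem_toFinset, List.mem_append, List.mem_singleton] at *
    exact Or.inl hx
  · intro hsub
    have hmem : node ∈ (adjacency.map Prod.fst ++ reverse_adjacency.map Prod.fst).toFinset \ c.toFinset :=
      Finset.mem_sdiff.mpr ⟨List.mem_toFinset.mpr hk, by simp [hc]⟩
    have := hsub hmem
    simp at this

theorem pvMeasure_append_not_key (adjacency reverse_adjacency : List (String × List String))
    {c : List String} {node : String}
    (hk : node ∉ (adjacency.map Prod.fst ++ reverse_adjacency.map Prod.fst)) :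
    pvMeasure adjacency reverse_adjacency (c ++ [node]) = pvMeasure adjacency reverse_adjacency c := by
  unfold pvMeasure
  congr 1
  ext a
  simp only [Finset.mem_sdiff, List.mem_toFinset, List.mem_append, List.mem_singleton]
  constructor
  · rintro ⟨ha, hb⟩; exact ⟨ha, fun h => hb (Or.inl h)⟩
  · rintro ⟨ha, hb⟩
    refine ⟨ha, ?_⟩
    rintro (h | rfl)
    · exact hb h
    · exact hk (List.mem_append.mpr ha)

-- ===== PORT A =====
-- the two stack.extend calls of one iteration: adjacency neighbours then reverse ones
def pvNbrs (adjacency reverse_adjacency : List (String × List String)) (node : String) : List String :=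
  pvLookup adjacency node ++ pvLookup reverse_adjacency node

theorem pvNbrs_eq_nil (adjacency reverse_adjacency : List (String × List String)) (node : String)
    (h : node ∉ (adjacency.map Prod.fst ++ reverse_adjacency.map Prod.fst)) :
    pvNbrs adjacency reverse_adjacency node = [] := by
  simp only [List.mem_append, not_or] at h
  unfold pvNbrs
  rw [pvLookup_eq_nil adjacency node h.1, pvLookup_eq_nil reverse_adjacency node h.2]
  rfl

-- the while loop: stack kept top-first (Python's list has its top at the END; extend-then-pop
-- therefore consumes the two neighbour lists back-to-front, i.e. their concatenation reversed)
def collect_component_loop (adjacency reverse_adjacency : List (String × List String)) :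
    List String → PySem.Set String → PySem.Set String
  | [], component => component
  | node :: stack, component =>
    if hmem : PySem.Set.contains component node then
      collect_component_loop adjacency reverse_adjacency stack component
    else
      collect_component_loop adjacency reverse_adjacency
        ((pvNbrs adjacency reverse_adjacency node).reverse ++ stack)
        (PySem.Set.add component node)
  termination_by stack component =>
    (pvMeasure adjacency reverse_adjacency component, stack.length)
  decreasing_by
  · exact Prod.Lex.right _ (Nat.lt_succ_self _)
  · simp only [PySem.Set.contains, List.contains_eq_mem, decide_eq_true_eq] at hmem
    have hadd : PySem.Set.add component node = component ++ [node] := by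
      simp [PySem.Set.add, PySem.Set.contains, hmem]
    by_cases hk : node ∈ (adjacency.map Prod.fst ++ reverse_adjacency.map Prod.fst)
    · apply Prod.Lex.left
      rw [hadd]
      exact pvMeasure_append_lt adjacency reverse_adjacency hk hmem
    · rw [pvNbrs_eq_nil adjacency reverse_adjacency node hk, hadd,
        pvMeasure_append_not_key adjacency reverse_adjacency hk]
      exact Prod.Lex.right _ (by simp)

def collect_component_py (start : String) (adjacency : List (String × List String)) (reverse_adjacency : List (String × List String)) : List String :=
  collect_component_loop adjacency reverse_adjacency [start] PySem.Set.empty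

-- ===== PORT B =====
-- dfs(node) of Source B (collect_dfs) and its two 'for … : dfs(…)' loops (collect_dfs_for); the
-- Python loops iterate over SETS, whose iteration order is unspecified, so this port picks the
-- back-to-front order on the representative lists; the subtype result records only that the
-- component grows (needed by the termination argument), the value is .1
mutual
def collect_dfs (adjacency reverse_adjacency : List (String × List String))
    (node : String) (component : PySem.Set String) :
    {c : PySem.Set String // ∀ x ∈ component, x ∈ c} :=
  if hmem : PySem.Set.contains component node then
    ⟨component, fun _ h => h⟩
  else
    let r1 := collect_dfs_for adjacency reverse_adjacency
      ((pvLookup reverse_adjacency node).reverse) (PySem.Set.add component node)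
    let r2 := collect_dfs_for adjacency reverse_adjacency
      ((pvLookup adjacency node).reverse) r1.1
    ⟨r2.1, fun x hx => r2.2 x (r1.2 x ((PySem.Set.mem_add component node x).mpr (Or.inl hx)))⟩
  termination_by (pvMeasure adjacency reverse_adjacency component, 0, 1)
  decreasing_by
  · simp only [PySem.Set.contains, List.contains_eq_mem, decide_eq_true_eq] at hmem
    have hadd : PySem.Set.add component node = component ++ [node] := by
      simp [PySem.Set.add, PySem.Set.contains, hmem]
    by_cases hk : node ∈ (adjacency.map Prod.fst ++ reverse_adjacency.map Prod.fst)
    · apply Prod.Lex.left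
      rw [hadd]
      exact pvMeasure_append_lt adjacency reverse_adjacency hk hmem
    · have h2 : node ∉ reverse_adjacency.map Prod.fst :=
        fun m => hk (List.mem_append.mpr (Or.inr m))
      rw [hadd, pvMeasure_append_not_key adjacency reverse_adjacency hk,
        pvLookup_eq_nil reverse_adjacency node h2]
      exact Prod.Lex.right _ (Prod.Lex.right _ (Nat.lt_succ_self 0))
  · simp only [PySem.Set.contains, List.contains_eq_mem, decide_eq_true_eq] at hmem
    have hadd : PySem.Set.add component node = component ++ [node] := by
      simp [PySem.Set.add, PySem.Set.contains, hmem]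
    have hle : pvMeasure adjacency reverse_adjacency r1.1 ≤
        pvMeasure adjacency reverse_adjacency (PySem.Set.add component node) :=
      pvMeasure_le adjacency reverse_adjacency r1.2
    by_cases hk : node ∈ (adjacency.map Prod.fst ++ reverse_adjacency.map Prod.fst)
    · apply Prod.Lex.left
      exact lt_of_le_of_lt hle
        (by rw [hadd]; exact pvMeasure_append_lt adjacency reverse_adjacency hk hmem)
    · have h1 : node ∉ adjacency.map Prod.fst :=
        fun m => hk (List.mem_append.mpr (Or.inl m))
      rw [pvLookup_eq_nil adjacency node h1]
      have hle' : pvMeasure adjacency reverse_adjacency r1.1 ≤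
          pvMeasure adjacency reverse_adjacency component :=
        hle.trans (le_of_eq (by
          rw [hadd]; exact pvMeasure_append_not_key adjacency reverse_adjacency hk))
      rcases lt_or_eq_of_le hle' with h | h
      · exact Prod.Lex.left _ _ h
      · rw [h]
        exact Prod.Lex.right _ (Prod.Lex.right _ (Nat.lt_succ_self 0))

def collect_dfs_for (adjacency reverse_adjacency : List (String × List String)) :
    (nodes : List String) → (component : PySem.Set String) →
    {c : PySem.Set String // ∀ x ∈ component, x ∈ c}
  | [], component => ⟨component, fun _ h => h⟩
  | x :: xs, component =>
    let r := collect_dfs adjacency reverse_adjacency x component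
    let r' := collect_dfs_for adjacency reverse_adjacency xs r.1
    ⟨r'.1, fun y hy => r'.2 y (r.2 y hy)⟩
  termination_by nodes component => (pvMeasure adjacency reverse_adjacency component, nodes.length, 0)
  decreasing_by
  · exact Prod.Lex.right _ (Prod.Lex.left _ _ (Nat.succ_pos _))
  · rcases lt_or_eq_of_le (pvMeasure_le adjacency reverse_adjacency r.2) with h | h
    · exact Prod.Lex.left _ _ h
    · rw [h]
      exact Prod.Lex.right _ (Prod.Lex.left _ _ (Nat.lt_succ_self _))
end

def collect_component_py_alt (start : String) (adjacency : List (String × List String)) (reverse_adjacency : List (String × List String)) : List String :=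
  (collect_dfs adjacency reverse_adjacency start PySem.Set.empty).1

-- ===== PRECONDITION & SPEC =====
def Spec_collect_component_py (start : String) (adjacency : List (String × List String)) (reverse_adjacency : List (String × List String)) (out : List String) : Prop := out = collect_component_py_alt start adjacency reverse_adjacency
instance (start : String) (adjacency : List (String × List String)) (reverse_adjacency : List (String × List String)) (out : List String) : Decidable (Spec_collect_component_py start adjacency reverse_adjacency out) := by unfold Spec_collect_component_py; infer_instance

-- ===== CLAIM (what is proved, stated in full; the proofs are below) =====
def Claim_equal_collect_component_py : Prop := ∀ (start : String) (adjacency : List (String × List String)) (reverse_adjacency : List (String × List String)), Dom_collect_component_py start adjacency reverse_adjacency → Spec_collect_component_py start adjacency reverse_adjacency (collect_component_py start adjacency reverse_adjacency)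

-- ===== LEMMAS AND PROOFS =====

-- unfolding equations for the well-founded definitions, stated on the values
theorem dfs_mem (adjacency reverse_adjacency : List (String × List String))
    (node : String) (component : PySem.Set String)
    (h : PySem.Set.contains component node) :
    (collect_dfs adjacency reverse_adjacency node component).1 = component := by
  rw [collect_dfs, dif_pos h]

theorem dfs_not_mem (adjacency reverse_adjacency : List (String × List String))
    (node : String) (component : PySem.Set String)
    (h : ¬ PySem.Set.contains component node) :
    (collect_dfs adjacency reverse_adjacency node component).1 =
      (collect_dfs_for adjacency reverse_adjacency
        ((pvLookup adjacency node).reverse)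
        (collect_dfs_for adjacency reverse_adjacency
          ((pvLookup reverse_adjacency node).reverse)
          (PySem.Set.add component node)).1).1 := by
  rw [collect_dfs, dif_neg h]

theorem dfs_for_nil (adjacency reverse_adjacency : List (String × List String))
    (component : PySem.Set String) :
    (collect_dfs_for adjacency reverse_adjacency [] component).1 = component := by
  rw [collect_dfs_for]

theorem dfs_for_cons (adjacency reverse_adjacency : List (String × List String))
    (x : String) (xs : List String) (component : PySem.Set String) :
    (collect_dfs_for adjacency reverse_adjacency (x :: xs) component).1 =
      (collect_dfs_for adjacency reverse_adjacency xs
        (collect_dfs adjacency reverse_adjacency x component).1).1 := by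
  rw [collect_dfs_for]

-- B's loop over a concatenated node list is two successive loops
theorem dfs_for_append (adjacency reverse_adjacency : List (String × List String))
    (xs : List String) : ∀ (ys : List String) (component : PySem.Set String),
    (collect_dfs_for adjacency reverse_adjacency (xs ++ ys) component).1 =
      (collect_dfs_for adjacency reverse_adjacency ys
        (collect_dfs_for adjacency reverse_adjacency xs component).1).1 := by
  induction xs with
  | nil =>
    intro ys component
    rw [List.nil_append, dfs_for_nil]
  | cons x xs ih =>
    intro ys component
    rw [List.cons_append, dfs_for_cons, dfs_for_cons, ih]

-- A's stack loop computes exactly B's recursive DFS applied to each stack entry in turn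
theorem loop_eq_dfs (adjacency reverse_adjacency : List (String × List String)) :
    ∀ (stack : List String) (component : PySem.Set String),
    collect_component_loop adjacency reverse_adjacency stack component =
      (collect_dfs_for adjacency reverse_adjacency stack component).1 := by
  intro stack component
  induction stack, component using collect_component_loop.induct adjacency reverse_adjacency with
  | case1 component =>
    rw [collect_component_loop, dfs_for_nil]
  | case2 node stack component hmem ih =>
    rw [collect_component_loop, dif_pos hmem, dfs_for_cons,
      dfs_mem adjacency reverse_adjacency node component hmem, ih]
  | case3 node stack component hmem ih =>
    rw [collect_component_loop, dif_neg hmem, ih, dfs_for_cons,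
      dfs_not_mem adjacency reverse_adjacency node component hmem]
    show (collect_dfs_for adjacency reverse_adjacency
        ((pvLookup adjacency node ++ pvLookup reverse_adjacency node).reverse ++ stack) _).1 = _
    rw [List.reverse_append, List.append_assoc, dfs_for_append, dfs_for_append]

-- ===== VERDICT (by name: the statement is the Claim_ definition above) =====
theorem collect_component_py_spec : Claim_equal_collect_component_py := by
  intro start adjacency reverse_adjacency _
  unfold Spec_collect_component_py collect_component_py collect_component_py_alt
  rw [loop_eq_dfs adjacency reverse_adjacency [start] PySem.Set.empty, dfs_for_cons, dfs_for_nil]
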